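-- pv_equiv track=rewrite | github.com/nayfusaurus/maestro-keypress | src/maestro/keymap_15_double.py | midi_note_to_key_15_double
-- ===== SOURCE A (Python) =====
-- SHARP_OFFSETS = {1, 3, 6, 8, 10}
--
-- ROW_HIGH = {
--     0: "q",  # C (Do)
--     2: "w",  # D (Re)
--     4: "e",  # E (Mi)
--     5: "r",  # F (Fa)
--     7: "t",  # G (Sol)
--     9: "y",  # A (La)
--     11: "u",  # B (Si)
-- }
--
-- ROW_MID = {
--     0: "a",  # C (Do)
--     2: "s",  # D (Re)
--     4: "d",  # E (Mi)
--     5: "f",  # F (Fa)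
--     7: "g",  # G (Sol)
--     9: "h",  # A (La)
--     11: "j",  # B (Si)
-- }
--
-- EXTENDED_HIGH = "i"  # C6 (MIDI 84)
--
-- MIDI_MID_START = 60  # C4 (Middle C)
--
-- MIDI_HIGH_START = 72  # C5
--
-- MIDI_EXTENDED_HIGH = 84  # C6 (highest playable note)
--
-- SHARP_TO_NATURAL = {
--     1: 0,  # C# -> C
--     3: 2,  # D# -> D
--     6: 5,  # F# -> F
--     8: 7,  # G# -> G
--     10: 9,  # A# -> A
-- }
--
-- def midi_note_to_key_15_double(
--     midi_note: int, transpose: bool = False, sharp_handling: str = "skip"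
-- ) -> str | None:
--     """Convert a MIDI note number to a Heartopia 15-key double row keyboard key.
--
--     Args:
--         midi_note: MIDI note number (0-127, where 60 = Middle C)
--         transpose: If True, transpose out-of-range notes into range.
--                    If False (default), return None for out-of-range notes.
--         sharp_handling: How to handle sharp notes:
--                         "skip" (default) - return None for sharp notes
--                         "snap" - snap to nearest natural note
--
--     Returns:
--         Keyboard key character to press, or None if out of range/sharp and skipped
--     """
--     # Check if note is out of range
--     if midi_note < MIDI_MID_START or midi_note > MIDI_EXTENDED_HIGH:
--         if not transpose:
--             return None
--         # Transpose notes into our playable range (60-84)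
--         while midi_note < MIDI_MID_START:
--             midi_note += 12
--         while midi_note > MIDI_EXTENDED_HIGH:
--             midi_note -= 12
--
--     # Handle extended high note
--     if midi_note == MIDI_EXTENDED_HIGH:
--         return EXTENDED_HIGH
--
--     # Determine note offset within octave (0-11)
--     note_in_octave = midi_note % 12
--
--     # Handle sharp notes
--     if note_in_octave in SHARP_OFFSETS:
--         if sharp_handling == "snap":
--             note_in_octave = SHARP_TO_NATURAL[note_in_octave]
--         else:
--             # Default "skip" mode - return None for sharps
--             return None
--
--     # Determine which row and get the key
--     if midi_note >= MIDI_HIGH_START: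
--         return ROW_HIGH[note_in_octave]
--     else:
--         return ROW_MID[note_in_octave]
-- ===== SOURCE B (Python) =====
-- def _core(n, sharp_handling):
--     if n == 84:
--         return "i"
--     pc = n % 12
--     if pc in (1, 3, 6, 8, 10):
--         if sharp_handling != "snap":
--             return None
--         pc -= 1
--     deg = pc // 2 + (1 if pc >= 5 else 0)
--     row = ["q", "w", "e", "r", "t", "y", "u"] if n >= 72 else ["a", "s", "d", "f", "g", "h", "j"]
--     return row[deg]
--
--
-- def midi_note_to_key_15_double(midi_note, transpose=False, sharp_handling="skip"):
--     if not (60 <= midi_note <= 84):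
--         if not transpose:
--             return None
--         midi_note = (60 + (midi_note - 60) % 12 if midi_note < 60
--                      else 84 - (84 - midi_note) % 12)
--     return _core(midi_note, sharp_handling)
-- ===== Notes on version B (the rewrite author's own statement) =====
-- stated objective: alternative
-- what changed: Replaces both while-loop transpositions with closed-form modular arithmetic and replaces all four table lookups (sharp set, sharp-to-natural dict, two row dicts) with arithmetic on the pitch class (snap = pc-1, scale degree = pc//2 + (pc>=5)) indexing a 7-char row string.
import Mathlib
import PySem

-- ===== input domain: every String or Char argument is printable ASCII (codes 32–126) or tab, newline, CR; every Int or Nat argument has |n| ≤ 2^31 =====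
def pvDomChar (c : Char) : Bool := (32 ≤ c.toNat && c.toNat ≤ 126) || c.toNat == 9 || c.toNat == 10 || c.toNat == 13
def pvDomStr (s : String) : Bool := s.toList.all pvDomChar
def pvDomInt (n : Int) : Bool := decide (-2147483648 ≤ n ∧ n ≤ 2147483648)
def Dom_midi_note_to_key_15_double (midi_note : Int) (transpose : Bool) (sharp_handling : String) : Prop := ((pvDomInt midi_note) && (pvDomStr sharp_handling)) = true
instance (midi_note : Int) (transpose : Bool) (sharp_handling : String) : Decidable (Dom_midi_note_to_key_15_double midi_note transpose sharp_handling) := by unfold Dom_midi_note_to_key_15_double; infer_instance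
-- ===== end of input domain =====

-- B replaces A's while-loop transpositions with closed-form modular arithmetic and its
-- set/dict table lookups with arithmetic on the pitch class (alternative algorithm, same cost on in-range notes).


-- ===== PORT A =====
def pvSHARP_OFFSETS : PySem.Set Int := PySem.Set.ofList [1, 3, 6, 8, 10]
def pvROW_HIGH : PySem.Dict Int String :=
  PySem.Dict.ofList [(0, "q"), (2, "w"), (4, "e"), (5, "r"), (7, "t"), (9, "y"), (11, "u")]
def pvROW_MID : PySem.Dict Int String :=
  PySem.Dict.ofList [(0, "a"), (2, "s"), (4, "d"), (5, "f"), (7, "g"), (9, "h"), (11, "j")]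
def pvSHARP_TO_NATURAL : PySem.Dict Int Int :=
  PySem.Dict.ofList [(1, 0), (3, 2), (6, 5), (8, 7), (10, 9)]

-- while midi_note < MIDI_MID_START: midi_note += 12
def pvTransposeUp (n : Int) : Int :=
  if n < 60 then pvTransposeUp (n + 12) else n
termination_by (60 - n).toNat
decreasing_by omega

-- while midi_note > MIDI_EXTENDED_HIGH: midi_note -= 12
def pvTransposeDown (n : Int) : Int :=
  if n > 84 then pvTransposeDown (n - 12) else n
termination_by (n - 84).toNat
decreasing_by omega

-- final 'if midi_note >= MIDI_HIGH_START: return ROW_HIGH[…] else: return ROW_MID[…]' (none = KeyError, unreachable)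
def pvRowLookup (midi_note : Int) (note_in_octave : Int) : Option String :=
  if midi_note ≥ 72 then PySem.Dict.get? pvROW_HIGH note_in_octave
  else PySem.Dict.get? pvROW_MID note_in_octave

-- the straight-line tail of A after the transposition block
def pvRestA (midi_note : Int) (sharp_handling : String) : Option String :=
  if midi_note = 84 then some "i"
  else
    let note_in_octave := PySem.Int.mod midi_note 12
    if PySem.Set.contains pvSHARP_OFFSETS note_in_octave then
      if sharp_handling = "snap" then
        (PySem.Dict.get? pvSHARP_TO_NATURAL note_in_octave).bind (pvRowLookup midi_note)
      else none
    else pvRowLookup midi_note note_in_octave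

def midi_note_to_key_15_double (midi_note : Int) (transpose : Bool) (sharp_handling : String) : Option String :=
  if midi_note < 60 ∨ midi_note > 84 then
    if !transpose then none
    else pvRestA (pvTransposeDown (pvTransposeUp midi_note)) sharp_handling
  else pvRestA midi_note sharp_handling

-- ===== PORT B =====
def pvAltCore (n : Int) (sharp_handling : String) : Option String :=
  if n = 84 then some "i"
  else
    let pc := PySem.Int.mod n 12
    let pc' : Option Int :=
      if pc = 1 ∨ pc = 3 ∨ pc = 6 ∨ pc = 8 ∨ pc = 10 then
        if sharp_handling ≠ "snap" then none else some (pc - 1)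
      else some pc
    pc'.bind (fun pc =>
      let deg := PySem.Int.floordiv pc 2 + (if pc ≥ 5 then 1 else 0)
      let row := if n ≥ 72 then ["q", "w", "e", "r", "t", "y", "u"]
                 else ["a", "s", "d", "f", "g", "h", "j"]
      PySem.List.pyGet? row deg)

def midi_note_to_key_15_double_alt (midi_note : Int) (transpose : Bool) (sharp_handling : String) : Option String :=
  if ¬(60 ≤ midi_note ∧ midi_note ≤ 84) then
    if !transpose then none
    else pvAltCore (if midi_note < 60 then 60 + PySem.Int.mod (midi_note - 60) 12
                    else 84 - PySem.Int.mod (84 - midi_note) 12) sharp_handling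
  else pvAltCore midi_note sharp_handling

-- ===== PRECONDITION & SPEC =====
def Spec_midi_note_to_key_15_double (midi_note : Int) (transpose : Bool) (sharp_handling : String) (out : Option String) : Prop := out = midi_note_to_key_15_double_alt midi_note transpose sharp_handling
instance (midi_note : Int) (transpose : Bool) (sharp_handling : String) (out : Option String) : Decidable (Spec_midi_note_to_key_15_double midi_note transpose sharp_handling out) := by unfold Spec_midi_note_to_key_15_double; infer_instance

-- ===== CLAIM (what is proved, stated in full; the proofs are below) =====
def Claim_equal_midi_note_to_key_15_double : Prop := ∀ (midi_note : Int) (transpose : Bool) (sharp_handling : String), Dom_midi_note_to_key_15_double midi_note transpose sharp_handling → Spec_midi_note_to_key_15_double midi_note transpose sharp_handling (midi_note_to_key_15_double midi_note transpose sharp_handling)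

-- ===== LEMMAS AND PROOFS =====

lemma pv_core_eq (m : Int) (sh : String) (h1 : 60 ≤ m) (h2 : m ≤ 84) :
    pvRestA m sh = pvAltCore m sh := by
  by_cases hb : sh = "snap"
  · subst hb; interval_cases m <;> decide
  · interval_cases m <;>
      simp [pvRestA, pvAltCore, pvRowLookup, hb, PySem.Int.mod, PySem.Set.contains,
            pvSHARP_OFFSETS] <;> decide

lemma pv_up_aux (k : Nat) : ∀ n : Int, 60 - n ≤ (k : Int) → n < 60 →
    pvTransposeUp n = 60 + (n - 60) % 12 := by
  induction k with
  | zero => intro n hk hn; omega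
  | succ k ih =>
    intro n hk hn
    rw [pvTransposeUp, if_pos hn]
    by_cases h2 : n + 12 < 60
    · rw [ih (n + 12) (by omega) h2]
      have : n + 12 - 60 = n - 60 + 12 := by ring
      rw [this, Int.add_emod_right]
    · rw [pvTransposeUp, if_neg h2]; omega

lemma pv_up_eq (n : Int) (h : n < 60) : pvTransposeUp n = 60 + (n - 60) % 12 :=
  pv_up_aux (60 - n).toNat n (by omega) h

lemma pv_up_id (n : Int) (h : 60 ≤ n) : pvTransposeUp n = n := by
  rw [pvTransposeUp, if_neg (by omega)]

lemma pv_down_aux (k : Nat) : ∀ n : Int, n - 84 ≤ (k : Int) → 84 < n →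
    pvTransposeDown n = 84 - (84 - n) % 12 := by
  induction k with
  | zero => intro n hk hn; omega
  | succ k ih =>
    intro n hk hn
    rw [pvTransposeDown, if_pos hn]
    by_cases h2 : 84 < n - 12
    · rw [ih (n - 12) (by omega) h2]
      have : 84 - (n - 12) = 84 - n + 12 := by ring
      rw [this, Int.add_emod_right]
    · rw [pvTransposeDown, if_neg (by omega)]; omega

lemma pv_down_eq (n : Int) (h : 84 < n) : pvTransposeDown n = 84 - (84 - n) % 12 :=
  pv_down_aux (n - 84).toNat n (by omega) h

lemma pv_down_id (n : Int) (h : n ≤ 84) : pvTransposeDown n = n := by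
  rw [pvTransposeDown, if_neg (by omega)]

lemma pv_main_in_or_high (m : Int) (t : Bool) (sh : String) (h : 60 ≤ m) :
    midi_note_to_key_15_double m t sh = midi_note_to_key_15_double_alt m t sh := by
  rcases le_or_gt m 84 with h2 | h2
  · have hA : ¬(m < 60 ∨ m > 84) := by omega
    have hB : 60 ≤ m ∧ m ≤ 84 := by omega
    simp only [midi_note_to_key_15_double, midi_note_to_key_15_double_alt, hA, hB,
      not_true, if_neg, if_false]
    exact pv_core_eq m sh h h2
  · have hA : m < 60 ∨ m > 84 := Or.inr h2
    have hB : ¬(60 ≤ m ∧ m ≤ 84) := by omega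
    have hlo : ¬(m < 60) := by omega
    cases t with
    | false => simp [midi_note_to_key_15_double, midi_note_to_key_15_double_alt, hA, hB]
    | true =>
      simp only [midi_note_to_key_15_double, midi_note_to_key_15_double_alt, hA, hB,
        Bool.not_true, Bool.false_eq_true, if_false, hlo, false_or, not_false_iff, if_true]
      rw [pv_up_id m (by omega), pv_down_eq m h2,
          PySem.Int.mod_eq_emod_of_pos (by omega)]
      have h3 := Int.emod_nonneg (84 - m) (by norm_num : (12:ℤ) ≠ 0)
      have h4 := Int.emod_lt_of_pos (84 - m) (by norm_num : (0:ℤ) < 12)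
      rw [if_pos h2]
      exact pv_core_eq (84 - (84 - m) % 12) sh (by omega) (by omega)

-- ===== VERDICT (by name: the statement is the Claim_ definition above) =====
theorem midi_note_to_key_15_double_spec : Claim_equal_midi_note_to_key_15_double := by
  intro m t sh _
  unfold Spec_midi_note_to_key_15_double
  rcases lt_trichotomy m 60 with h | h | h
  case inr.inr => exact pv_main_in_or_high m t sh (by omega)
  case inr.inl => exact pv_main_in_or_high m t sh (by omega)
  case inl =>
    have hA : m < 60 ∨ m > 84 := Or.inl h
    have hB : ¬(60 ≤ m ∧ m ≤ 84) := by omega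
    cases t with
    | false => simp [midi_note_to_key_15_double, midi_note_to_key_15_double_alt, hA, hB]
    | true =>
      simp only [midi_note_to_key_15_double, midi_note_to_key_15_double_alt, hA, hB,
        Bool.not_true, Bool.false_eq_true, if_false, h, eq_self_iff_true, if_true,
        not_false_iff]
      rw [pv_up_eq m h, pv_down_id _ (by omega),
          PySem.Int.mod_eq_emod_of_pos (by omega)]
      exact pv_core_eq _ sh (by omega) (by omega)
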